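-- pv_equiv track=rewrite | github.com/SukjinMun/Scholarly_Paper_Crawler | scripts/webcrawler_paper_search.py | generate_keyword_combinations
-- ===== SOURCE A (Python) =====
-- from itertools import permutations
--
-- def generate_keyword_combinations(keywords):
--     # Generate all possible combinations of keywords including individual keywords
--     # and their permutations
--     # Split and clean keywords
--     keyword_list = [k.strip() for k in keywords.split(',')]
--
--     # Generate all possible combinations
--     all_combinations = []
--
--     # Add individual keywords
--     all_combinations.extend(keyword_list)
--
--     # Generate permutations for lengths 2 to n
--     for length in range(2, len(keyword_list) + 1):
--         perms = list(permutations(keyword_list, length))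
--         for perm in perms:
--             # Join with spaces to create search term
--             all_combinations.append(' '.join(perm))
--
--     return all_combinations
-- ===== SOURCE B (Python) =====
-- def generate_keyword_combinations(keywords):
--     # Explicit index-based backtracking instead of itertools.permutations;
--     # length-1 pass reproduces the individual keywords.
--     kws = [k.strip() for k in keywords.split(',')]
--     n = len(kws)
--     out = []
--
--     def go(used, path, remaining):
--         if remaining == 0:
--             out.append(' '.join(path))
--             return
--         for i in range(n):
--             if i not in used:
--                 go(used + [i], path + [kws[i]], remaining - 1)
--
--     for length in range(1, n + 1):
--         go([], [], length)
--     return out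
-- ===== Notes on version B (the rewrite author's own statement) =====
-- stated objective: alternative
-- what changed: Replaced the itertools.permutations library calls with an explicit index-based backtracking recursion over lengths 1..n, folding the individual-keyword case into the length-1 pass.
import Mathlib
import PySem

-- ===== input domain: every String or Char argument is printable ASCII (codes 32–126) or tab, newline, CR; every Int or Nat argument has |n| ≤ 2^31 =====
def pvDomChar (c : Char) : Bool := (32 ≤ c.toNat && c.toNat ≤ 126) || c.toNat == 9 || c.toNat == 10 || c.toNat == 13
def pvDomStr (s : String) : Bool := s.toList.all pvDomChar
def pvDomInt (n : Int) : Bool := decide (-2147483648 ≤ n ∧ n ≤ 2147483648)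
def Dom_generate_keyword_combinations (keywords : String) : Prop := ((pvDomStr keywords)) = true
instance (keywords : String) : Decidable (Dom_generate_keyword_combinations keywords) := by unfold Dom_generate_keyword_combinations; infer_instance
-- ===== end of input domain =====

-- B replaces itertools.permutations with an explicit index-based backtracking recursion
-- (lengths 1..n, the length-1 pass yielding the individual keywords); same cost, different structure.

-- ===== PORT A =====
-- split(',') has a non-empty separator, so PySem.Str.split? is always `some`; `.getD []` is exact.
def generate_keyword_combinations (keywords : String) : List String :=
  let keyword_list : List String :=
    ((PySem.Str.split? keywords ",").getD []).map PySem.Str.strip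
  let all_combinations : List String := [] ++ keyword_list
  -- for length in range(2, len(keyword_list) + 1): for perm in permutations(keyword_list, length): append(' '.join(perm))
  (PySem.List.pyRange 2 ((keyword_list.length : Int) + 1) 1).foldl
    (fun acc len =>
      (PySem.List.permutations keyword_list len.toNat).foldl
        (fun acc2 perm => acc2 ++ [PySem.Str.join " " perm]) acc)
    all_combinations

-- ===== PORT B =====
-- go(used, path, remaining): emit ' '.join(path) when remaining == 0, else try every unused index in order.
def gkc_go (kws : List String) (used : List Nat) (path : List String) : Nat → List String
  | 0 => [PySem.Str.join " " path]
  | r + 1 =>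
    (List.range kws.length).foldl
      (fun acc i =>
        if used.contains i then acc
        else acc ++ gkc_go kws (used ++ [i]) (path ++ [kws.getD i ""]) r) []

def generate_keyword_combinations_alt (keywords : String) : List String :=
  let kws : List String :=
    ((PySem.Str.split? keywords ",").getD []).map PySem.Str.strip
  -- for length in range(1, n + 1): go([], [], length)
  (PySem.List.pyRange 1 ((kws.length : Int) + 1) 1).foldl
    (fun acc len => acc ++ gkc_go kws [] [] len.toNat) []

-- ===== PRECONDITION & SPEC =====
def Spec_generate_keyword_combinations (keywords : String) (out : List String) : Prop := out = generate_keyword_combinations_alt keywords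
instance (keywords : String) (out : List String) : Decidable (Spec_generate_keyword_combinations keywords out) := by unfold Spec_generate_keyword_combinations; infer_instance

-- ===== CLAIM (what is proved, stated in full; the proofs are below) =====
def Claim_equal_generate_keyword_combinations : Prop := ∀ (keywords : String), Dom_generate_keyword_combinations keywords → Spec_generate_keyword_combinations keywords (generate_keyword_combinations keywords)

-- ===== LEMMAS AND PROOFS =====

-- "picks": every way to pick one element (in order) with the rest of the list, itertools-style.
def pvPicks {α : Type} : List α → List (α × List α)
  | [] => []
  | x :: t => (x, t) :: (pvPicks t).map (fun p => (p.1, x :: p.2))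

theorem pvPicks_map_fst {α : Type} : ∀ (l : List α), (pvPicks l).map (·.1) = l
  | [] => rfl
  | x :: t => by simp [pvPicks, List.map_map, Function.comp_def, pvPicks_map_fst t]

theorem pvFoldlIf {α β : Type} (p : α → Bool) (g : α → List β) :
    ∀ (l : List α) (acc : List β),
      l.foldl (fun acc x => if p x then acc else acc ++ g x) acc
        = acc ++ (l.filter (fun x => !p x)).flatMap g
  | [], acc => by simp
  | x :: t, acc => by
    cases h : p x <;>
      simp [List.foldl_cons, h, pvFoldlIf p g t, List.append_assoc]

theorem pvFlatRange {α β : Type} (d : α) :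
    ∀ (t : List α) (F : α → List α → List β),
      (List.range t.length).flatMap (fun j => F (t.getD j d) (t.eraseIdx j))
        = (pvPicks t).flatMap (fun pr => F pr.1 pr.2)
  | [], _ => rfl
  | y :: u, F => by
    rw [List.length_cons, List.range_succ_eq_map]
    simp only [List.flatMap_cons, List.flatMap_map, List.getD_cons_zero,
      List.eraseIdx_cons_zero, List.getD_cons_succ, List.eraseIdx_cons_succ]
    rw [pvFlatRange d u (fun a b => F a (y :: b))]
    simp [pvPicks, List.flatMap_map]

theorem pvPermSucc {α : Type} (d : α) (xs : List α) (r : Nat) :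
    PySem.List.permutations xs (r + 1)
      = (List.range xs.length).flatMap
          (fun j => (PySem.List.permutations (xs.eraseIdx j) r).map (xs.getD j d :: ·)) := by
  show (List.range xs.length).flatMap
      (fun i => match xs[i]? with
        | none => []
        | some x => (PySem.List.permutations (xs.eraseIdx i) r).map (x :: ·)) = _
  refine List.flatMap_congr (fun j hj => ?_)
  have hlt : j < xs.length := List.mem_range.mp hj
  simp [List.getElem?_eq_getElem hlt]

theorem pvPermSel {α : Type} (d : α) (xs : List α) (r : Nat) :
    PySem.List.permutations xs (r + 1)
      = (pvPicks xs).flatMap (fun pr => (PySem.List.permutations pr.2 r).map (pr.1 :: ·)) := by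
  rw [pvPermSucc d xs r,
    pvFlatRange d xs (fun a b => (PySem.List.permutations b r).map (a :: ·))]

theorem pvPicksCorr {α : Type} (g : Nat → α) :
    ∀ (rem : List Nat), rem.Nodup →
      pvPicks (rem.map g)
        = rem.map (fun i => (g i, (rem.filter (fun j => j ≠ i)).map g))
  | [], _ => rfl
  | i :: t, h => by
    have hnot : i ∉ t := (List.nodup_cons.mp h).1
    have ht : t.Nodup := (List.nodup_cons.mp h).2
    simp only [List.map_cons, pvPicks, pvPicksCorr g t ht, List.map_map]
    refine List.cons_eq_cons.mpr ⟨?_, ?_⟩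
    · have hft : t.filter (fun j => !decide (j = i)) = t :=
        List.filter_eq_self.mpr (fun a ha => by
          simp only [Bool.not_eq_eq_eq_not, Bool.not_true, decide_eq_false_iff_not]
          exact fun hai => hnot (hai ▸ ha))
      simp [decide_not, hft]
    · refine List.map_congr_left (fun j hj => ?_)
      have hij : i ≠ j := fun hij => hnot (hij ▸ hj)
      simp [hij]

theorem pvGoEq (kws : List String) :
    ∀ (r : Nat) (used : List Nat) (path : List String),
      gkc_go kws used path r
        = (PySem.List.permutations
            (((List.range kws.length).filter (fun i => !used.contains i)).map
              (fun i => kws.getD i "")) r).map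
            (fun p => PySem.Str.join " " (path ++ p)) := by
  intro r
  induction r with
  | zero => intro used path; simp [gkc_go, PySem.List.permutations]
  | succ r ih =>
    intro used path
    rw [gkc_go, pvFoldlIf (fun i => used.contains i)
      (fun i => gkc_go kws (used ++ [i]) (path ++ [kws.getD i ""]) r), List.nil_append]
    simp only [ih]
    rw [pvPermSel "" _ r,
      pvPicksCorr (fun i => kws.getD i "")
        ((List.range kws.length).filter (fun i => !used.contains i))
        ((List.nodup_range).filter _)]
    simp only [List.flatMap_map, List.map_flatMap, List.map_map]
    refine List.flatMap_congr (fun i _ => ?_)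
    have hfil : (List.range kws.length).filter (fun j => !(used ++ [i]).contains j)
        = ((List.range kws.length).filter (fun j => !used.contains j)).filter
            (fun j => j ≠ i) := by
      rw [List.filter_filter]
      refine List.filter_congr (fun j _ => ?_)
      cases h1 : used.contains j <;> cases h2 : decide (j = i) <;>
        simp_all
    rw [hfil]
    refine List.map_congr_left (fun p _ => ?_)
    simp [List.append_assoc]

theorem pvMapGetDRange {α : Type} (l : List α) (d : α) :
    (List.range l.length).map (fun i => l.getD i d) = l := by
  refine List.ext_getElem (by simp) (fun i h1 h2 => ?_)
  simp [List.getElem?_eq_getElem h2]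

theorem pvChunk (kws : List String) (r : Nat) :
    gkc_go kws [] [] r
      = (PySem.List.permutations kws r).map (fun p => PySem.Str.join " " p) := by
  rw [pvGoEq kws r [] []]
  simp only [List.contains_nil, Bool.not_false, List.filter_true, pvMapGetDRange,
    List.nil_append]

theorem pvJoinOne (x : String) : PySem.Str.join " " [x] = x := by
  simp [PySem.Str.join]

theorem pvPermOne (kws : List String) :
    (PySem.List.permutations kws 1).map (fun p => PySem.Str.join " " p) = kws := by
  rw [pvPermSel "" kws 0]
  have h0 : ∀ (l : List String), PySem.List.permutations l 0 = [[]] := fun l => rfl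
  simp only [List.map_flatMap, h0, List.map_cons, List.map_nil]
  calc List.flatMap (fun a => [PySem.Str.join " " [a.1]]) (pvPicks kws)
      = List.flatMap (fun a => [a.1]) (pvPicks kws) := by simp only [pvJoinOne]
    _ = (pvPicks kws).map (·.1) := List.map_eq_flatMap.symm
    _ = kws := pvPicks_map_fst kws

-- ===== VERDICT (by name: the statement is the Claim_ definition above) =====
theorem generate_keyword_combinations_spec : Claim_equal_generate_keyword_combinations := by
  intro keywords _
  unfold Spec_generate_keyword_combinations
  unfold generate_keyword_combinations generate_keyword_combinations_alt
  set kws : List String := ((PySem.Str.split? keywords ",").getD []).map PySem.Str.strip with hkws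
  simp only [PySem.List.foldl_append_singleton_eq_map]
  rw [PySem.List.foldl_append_eq_flatMap, PySem.List.foldl_append_eq_flatMap, List.nil_append]
  simp only [pvChunk]
  rcases Nat.eq_zero_or_pos kws.length with h | h
  · have hk : kws = [] := List.eq_nil_of_length_eq_zero h
    simp [hk, PySem.List.pyRange_one_eq_nil (by norm_num : (1:Int) ≤ 1),
      PySem.List.pyRange_one_eq_nil (by norm_num : (1:Int) ≤ 2)]
  · have h1 : (1 : Int) < (kws.length : Int) + 1 := by exact_mod_cast Nat.lt_succ_of_le h
    rw [PySem.List.pyRange_one_cons h1, List.flatMap_cons]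
    norm_num
    rw [pvPermOne]
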